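-- pv_equiv track=rewrite | github.com/DanielNoord/adventofcode | solutions/year2021/day3.py | part1
-- ===== SOURCE A (Python) =====
-- def _get_bit(numbers: list[str], index: int, middle: float, most_common: bool) -> str:
--     """Get the most or least common bit for a given index."""
--     if sum(number[index] == "1" for number in numbers) >= middle:
--         return "1" if most_common else "0"
--     return "0" if most_common else "1"
--
-- def part1(data: str) -> str | int:
--     numbers = data.splitlines()
--
--     most_common_bits = ""
--     middle = len(numbers) // 2
--     for index in range(len(numbers[0])):
--         most_common_bits += _get_bit(numbers, index, middle, True)
--     gamma = int("".join(most_common_bits), 2)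
--     epsilon = int("".join("0" if i == "1" else "1" for i in most_common_bits), 2)
--     return gamma * epsilon
-- ===== SOURCE B (Python) =====
-- def part1(data: str) -> str | int:
--     numbers = data.splitlines()
--     width = len(numbers[0])
--     # one pass over the numbers, accumulating per-column '1' counts
--     counts = [0] * width
--     for num in numbers:
--         counts = [c + (1 if num[i] == "1" else 0) for i, c in enumerate(counts)]
--     half = len(numbers) // 2
--     gamma = 0
--     for c in counts:
--         gamma = gamma * 2 + (1 if c >= half else 0)
--     epsilon = (1 << width) - 1 - gamma
--     return gamma * epsilon
-- ===== Notes on version B (the rewrite author's own statement) =====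
-- stated objective: alternative
-- what changed: B replaces A's per-column scans over all numbers (and the two binary-string parses) with a single accumulation pass building a per-column count table, then derives gamma numerically from the table and epsilon as the arithmetic bit-complement (1<<width)-1-gamma instead of parsing a complemented string.
import Mathlib
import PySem

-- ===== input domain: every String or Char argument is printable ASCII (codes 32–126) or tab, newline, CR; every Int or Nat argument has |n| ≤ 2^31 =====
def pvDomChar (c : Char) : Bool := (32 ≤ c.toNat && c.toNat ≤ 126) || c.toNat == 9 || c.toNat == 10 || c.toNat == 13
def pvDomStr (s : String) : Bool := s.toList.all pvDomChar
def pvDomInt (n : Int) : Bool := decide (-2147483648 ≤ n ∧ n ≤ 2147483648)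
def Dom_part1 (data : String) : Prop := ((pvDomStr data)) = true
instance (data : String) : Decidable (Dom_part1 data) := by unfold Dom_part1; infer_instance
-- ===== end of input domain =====

-- B replaces A's per-column scans (and the two binary-string parses) with one accumulation
-- pass building a per-column count table, deriving gamma numerically and epsilon as the
-- arithmetic bit-complement (1 << width) - 1 - gamma; objective: alternative decomposition.

-- ===== PORT A =====

-- hand port of int(s, 2); exact for strings made of '0'/'1' characters, which are the only
-- arguments A ever passes it (most_common_bits and its complement)
def pvInt2 (bits : List Char) : Int :=
  bits.foldl (fun a c => a * 2 + (if c = '1' then 1 else 0)) 0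

def pvGetBit (numbers : List String) (index : Int) (middle : Int) (mostCommon : Bool) : Char :=
  if (numbers.map (fun number => if PySem.Str.pyGet? number index = some '1' then (1 : Int) else 0)).sum ≥ middle then
    (if mostCommon then '1' else '0')
  else
    (if mostCommon then '0' else '1')

def part1 (data : String) : Int :=
  let numbers := PySem.Str.splitlines data
  match PySem.List.pyGet? numbers 0 with
  | none => 0  -- numbers[0]: IndexError; excluded by Pre_part1
  | some first =>
    let middle := PySem.Int.floordiv (PySem.List.len numbers) 2
    -- most_common_bits, built as the list of its characters
    let mcb := (PySem.List.pyRange 0 (PySem.Str.len first) 1).foldl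
        (fun acc index => acc ++ [pvGetBit numbers index middle true]) []
    let gamma := pvInt2 mcb
    let epsilon := pvInt2 (mcb.map (fun i => if i = '1' then '0' else '1'))
    gamma * epsilon

-- ===== PORT B =====
def part1_alt (data : String) : Int :=
  let numbers := PySem.Str.splitlines data
  match PySem.List.pyGet? numbers 0 with
  | none => 0  -- numbers[0]: IndexError; excluded by Pre_part1
  | some first =>
    let width := first.toList.length
    let counts := numbers.foldl
        (fun cs num => (PySem.List.enumerate cs).map
          (fun p => p.2 + (if PySem.Str.pyGet? num p.1 = some '1' then (1 : Int) else 0)))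
        (List.replicate width (0 : Int))
    let half := PySem.Int.floordiv (PySem.List.len numbers) 2
    let gamma := counts.foldl (fun g c => g * 2 + (if c ≥ half then (1 : Int) else 0)) 0
    let epsilon := (2 : Int) ^ width - 1 - gamma
    gamma * epsilon

-- ===== PRECONDITION & SPEC =====
-- Pre_ excludes exactly the inputs where the Python A raises: no lines (numbers[0] is an
-- IndexError), an empty first line (int("", 2) is a ValueError), or a line shorter than the
-- first (number[index] is an IndexError).
def Pre_part1 (data : String) : Prop :=
  PySem.Str.splitlines data ≠ [] ∧
  ((PySem.Str.splitlines data).headD "").toList.length ≠ 0 ∧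
  ∀ s ∈ PySem.Str.splitlines data,
    ((PySem.Str.splitlines data).headD "").toList.length ≤ s.toList.length
instance (data : String) : Decidable (Pre_part1 data) := by unfold Pre_part1; infer_instance
def pvWitness_part1 : String := "10\n01\n11"

def Spec_part1 (data : String) (out : Int) : Prop := out = part1_alt data
instance (data : String) (out : Int) : Decidable (Spec_part1 data out) := by unfold Spec_part1; infer_instance

-- ===== CLAIM (what is proved, stated in full; the proofs are below) =====
def Claim_equal_part1 : Prop := ∀ (data : String), Dom_part1 data → Pre_part1 data → Spec_part1 data (part1 data)

-- ===== LEMMAS AND PROOFS =====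

theorem pv_enumerate_map {α β : Type} (g : α → β) :
    ∀ (l : List α) (s : Int),
      PySem.List.enumerate (l.map g) s = (PySem.List.enumerate l s).map (fun p => (p.1, g p.2)) := by
  intro l
  induction l with
  | nil => intro s; simp [PySem.List.enumerate_nil]
  | cons x xs ih => intro s; simp [PySem.List.enumerate_cons, ih]

theorem pv_enumerate_append {α : Type} :
    ∀ (l : List α) (x : α) (s : Int),
      PySem.List.enumerate (l ++ [x]) s
        = PySem.List.enumerate l s ++ [(s + l.length, x)] := by
  intro l
  induction l with
  | nil => intro x s; simp [PySem.List.enumerate_cons, PySem.List.enumerate_nil]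
  | cons y ys ih =>
    intro x s
    simp [PySem.List.enumerate_cons, ih]
    ring

theorem pv_enumerate_range :
    ∀ (L : Nat), PySem.List.enumerate (List.range L) 0 =
      (List.range L).map (fun (i : Nat) => ((i : Int), i)) := by
  intro L
  induction L with
  | zero => simp [PySem.List.enumerate_nil]
  | succ L ih =>
    rw [List.range_succ, pv_enumerate_append, ih]
    simp

-- one step of B's fold, applied to a table of the form (range L).map g
theorem pv_step_map (L : Nat) (g : Nat → Int) (num : String) :
    (PySem.List.enumerate ((List.range L).map g)).map
        (fun p => p.2 + (if PySem.Str.pyGet? num p.1 = some '1' then (1 : Int) else 0))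
      = (List.range L).map
        (fun i => g i + (if PySem.Str.pyGet? num (i : Int) = some '1' then (1 : Int) else 0)) := by
  rw [show (PySem.List.enumerate ((List.range L).map g)) = PySem.List.enumerate ((List.range L).map g) 0 from rfl]
  rw [pv_enumerate_map, pv_enumerate_range]
  simp [List.map_map, Function.comp]

-- B's accumulated table is the list of per-column '1'-counts
theorem pv_counts (L : Nat) :
    ∀ (ns : List String) (g : Nat → Int),
      ns.foldl
        (fun cs num => (PySem.List.enumerate cs).map
          (fun p => p.2 + (if PySem.Str.pyGet? num p.1 = some '1' then (1 : Int) else 0)))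
        ((List.range L).map g)
      = (List.range L).map
        (fun i => g i +
          (ns.map (fun num => if PySem.Str.pyGet? num (i : Int) = some '1' then (1 : Int) else 0)).sum) := by
  intro ns
  induction ns with
  | nil => intro g; simp
  | cons num rest ih =>
    intro g
    simp only [List.foldl_cons]
    rw [pv_step_map L g num, ih]
    apply List.map_congr_left
    intro i _
    simp [add_assoc]

-- folding int(·,2)'s step over the flipped bit string = arithmetic complement
theorem pv_int2_flip :
    ∀ (l : List Char) (a b : Int),
      l.foldl (fun a c => a * 2 + (if c = '1' then (1 : Int) else 0)) a
        + ((l.map (fun i => if i = '1' then '0' else '1')).foldl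
            (fun a c => a * 2 + (if c = '1' then (1 : Int) else 0)) b)
        = (a + b + 1) * 2 ^ l.length - 1 := by
  intro l
  induction l with
  | nil => intro a b; simp
  | cons c cs ih =>
    intro a b
    simp only [List.map_cons, List.foldl_cons, List.length_cons]
    rw [ih]
    by_cases hc : c = '1' <;> simp [hc] <;> ring

-- the whole value computation, over an abstract per-column count function c
theorem pv_final (L : Nat) (m : Int) (c : Nat → Int) :
    pvInt2 (List.map (fun x => if c x ≥ m then '1' else '0') (List.range L)) *
      pvInt2 (List.map (fun x => if (if c x ≥ m then '1' else '0') = '1' then '0' else '1') (List.range L))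
    = List.foldl (fun g x => g * 2 + if c x ≥ m then (1 : Int) else 0) 0 (List.range L) *
      ((2 : Int) ^ L - 1 -
        List.foldl (fun g x => g * 2 + if c x ≥ m then (1 : Int) else 0) 0 (List.range L)) := by
  have hgamma : pvInt2 (List.map (fun x => if c x ≥ m then '1' else '0') (List.range L))
      = List.foldl (fun g x => g * 2 + if c x ≥ m then (1 : Int) else 0) 0 (List.range L) := by
    simp only [pvInt2, List.foldl_map]
    apply PySem.List.foldl_congr_mem
    intro a x _
    by_cases hx : c x ≥ m <;> simp [hx]
  have hflip : pvInt2 ((List.range L).map (fun x => if c x ≥ m then '1' else '0'))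
      + pvInt2 (((List.range L).map (fun x => if c x ≥ m then '1' else '0')).map
          (fun i => if i = '1' then '0' else '1'))
      = ((0 : Int) + 0 + 1) * 2 ^ ((List.range L).map (fun x => if c x ≥ m then '1' else '0')).length - 1 :=
    pv_int2_flip _ 0 0
  simp only [List.length_map, List.length_range, List.map_map, Function.comp_def, zero_add] at hflip
  rw [hgamma] at hflip
  rw [hgamma]
  have heps : pvInt2 (List.map (fun x => if (if c x ≥ m then '1' else '0') = '1' then '0' else '1') (List.range L))
      = 2 ^ L - 1 - List.foldl (fun g x => g * 2 + if c x ≥ m then (1 : Int) else 0) 0 (List.range L) := by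
    linarith [hflip]
  rw [heps]

theorem part1_spec : Claim_equal_part1 := by
  intro data _ hpre
  unfold Spec_part1 part1 part1_alt
  obtain ⟨hne, -, -⟩ := hpre
  cases hcase : PySem.Str.splitlines data with
  | nil => exact absurd hcase hne
  | cons first rest =>
    simp only [PySem.List.pyGet?_zero_cons]
    simp only [PySem.Str.len_eq, PySem.List.pyRange_zero_natCast,
      PySem.List.foldl_append_singleton_eq_map, List.nil_append, List.foldl_map, List.map_map]
    set m := PySem.Int.floordiv (PySem.List.len (first :: rest)) 2 with hm
    set L := first.toList.length with hL
    set ns := first :: rest with hns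
    have hcnt :
        List.foldl (fun cs num => (PySem.List.enumerate cs).map
            (fun p => p.2 + if PySem.Str.pyGet? num p.1 = some '1' then (1 : Int) else 0))
          (List.replicate L (0 : Int)) ns
        = (List.range L).map (fun (i : Nat) =>
            (ns.map (fun num => if PySem.Str.pyGet? num (i : Int) = some '1' then (1 : Int) else 0)).sum) := by
      have hrep : List.replicate L (0 : Int) = (List.range L).map (fun _ => (0 : Int)) := by simp
      rw [hrep, pv_counts L ns (fun _ => 0)]
      simp
    rw [hcnt]
    have hbit : ∀ x : Nat, pvGetBit ns (↑x) m true
        = (if (ns.map (fun num => if PySem.Str.pyGet? num (x : Int) = some '1' then (1 : Int) else 0)).sum ≥ m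
           then '1' else '0') := by
      intro x
      simp only [pvGetBit, if_true]
    simp only [Function.comp_def, hbit, List.foldl_map]
    exact pv_final L m (fun x =>
      (ns.map (fun num => if PySem.Str.pyGet? num (x : Int) = some '1' then (1 : Int) else 0)).sum)
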